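-- pv_equiv track=rewrite | github.com/revvk/sta_bulletins | bulletin/sources/songs.py | slice_song_verses
-- ===== SOURCE A (Python) =====
-- def slice_song_verses(song_data: dict, max_verses: int) -> dict:
--     """Return a copy of song_data with sections trimmed to max_verses.
--
--     Keeps all chorus/refrain sections; only counts and limits verse sections.
--     """
--     sections = song_data.get("sections", [])
--     if not sections:
--         return song_data
--
--     trimmed = []
--     verse_count = 0
--     for section in sections:
--         if section.get("type") == "verse":
--             verse_count += 1
--             if verse_count > max_verses:
--                 continue
--         trimmed.append(section)
--
--     result = dict(song_data)
--     result["sections"] = trimmed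
--     return result
-- ===== SOURCE B (Python) =====
-- def slice_song_verses(song_data: dict, max_verses: int) -> dict:
--     """Return a copy of song_data with sections trimmed to max_verses.
--
--     Keeps all chorus/refrain sections; only counts and limits verse sections.
--     """
--     sections = song_data.get("sections", [])
--     if not sections:
--         return song_data
--
--     verse_idx = [i for i, s in enumerate(sections) if s.get("type") == "verse"]
--     keep = set(verse_idx[:max(max_verses, 0)])
--     trimmed = [s for i, s in enumerate(sections)
--                if s.get("type") != "verse" or i in keep]
--
--     result = dict(song_data)
--     result["sections"] = trimmed
--     return result
-- ===== Notes on version B (the rewrite author's own statement) =====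
-- stated objective: alternative
-- what changed: Replaces the single counting loop (verse counter threaded through one pass, skipping over-budget verses) with a two-phase index computation: first collect the enumerated positions of verse sections, form the keep-set of the first max(max_verses,0) of them, then filter the enumerated sections by membership in that set.
import Mathlib
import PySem

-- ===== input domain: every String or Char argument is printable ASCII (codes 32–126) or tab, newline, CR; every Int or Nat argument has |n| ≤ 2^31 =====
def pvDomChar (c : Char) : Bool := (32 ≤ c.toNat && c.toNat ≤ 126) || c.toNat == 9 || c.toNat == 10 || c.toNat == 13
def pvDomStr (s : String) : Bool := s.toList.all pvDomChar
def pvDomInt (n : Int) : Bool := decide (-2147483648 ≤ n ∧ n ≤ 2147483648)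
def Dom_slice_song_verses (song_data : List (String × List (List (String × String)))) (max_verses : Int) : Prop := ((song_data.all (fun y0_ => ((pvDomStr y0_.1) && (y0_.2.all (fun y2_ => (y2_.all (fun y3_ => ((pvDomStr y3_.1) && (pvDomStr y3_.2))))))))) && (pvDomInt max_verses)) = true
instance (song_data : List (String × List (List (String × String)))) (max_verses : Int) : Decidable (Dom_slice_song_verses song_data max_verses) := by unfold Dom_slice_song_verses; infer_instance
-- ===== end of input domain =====

-- B replaces A's single counting pass by a two-phase keep-set filter over enumerated
-- sections (alternative decomposition, same cost); equivalence of the RETURN value is proved.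

-- shared helper: section.get("type") == "verse"  (both Pythons compute exactly this)
def pvIsVerse (sec : List (String × String)) : Bool :=
  (PySem.Dict.mk sec).get? "type" == some "verse"

-- ===== PORT A =====
-- loop body of A's 'for section in sections' (kept as a named helper)
def pvStepA (mv : Int) (st : List (List (String × String)) × Int) (sec : List (String × String)) : List (List (String × String)) × Int :=
  if pvIsVerse sec then
    if st.2 + 1 > mv then (st.1, st.2 + 1)
    else (st.1 ++ [sec], st.2 + 1)
  else (st.1 ++ [sec], st.2)

def slice_song_verses (song_data : List (String × List (List (String × String)))) (max_verses : Int) : List (String × List (List (String × String))) :=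
  let d : PySem.Dict String (List (List (String × String))) := PySem.Dict.mk song_data
  let sections := d.getD "sections" []
  if sections.isEmpty then song_data
  else
    -- for section in sections: count verses, skip once verse_count > max_verses
    let st := sections.foldl (pvStepA max_verses) ([], 0)
    (d.insert "sections" st.1).items

-- ===== PORT B =====
def slice_song_verses_alt (song_data : List (String × List (List (String × String)))) (max_verses : Int) : List (String × List (List (String × String))) :=
  let d : PySem.Dict String (List (List (String × String))) := PySem.Dict.mk song_data
  let sections := d.getD "sections" []
  if sections.isEmpty then song_data
  else
    -- verse_idx = [i for i, s in enumerate(sections) if s.get("type") == "verse"]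
    let verse_idx := ((PySem.List.enumerate sections 0).filter (fun p => pvIsVerse p.2)).map (·.1)
    -- keep = set(verse_idx[:max(max_verses, 0)])
    let keep : PySem.Set Int := PySem.Set.ofList (PySem.List.slice verse_idx none (some (max max_verses 0)))
    -- trimmed = [s for i, s in enumerate(sections) if s.get("type") != "verse" or i in keep]
    let trimmed := ((PySem.List.enumerate sections 0).filter
        (fun p => !pvIsVerse p.2 || keep.contains p.1)).map (·.2)
    (d.insert "sections" trimmed).items

-- ===== PRECONDITION & SPEC =====
def Spec_slice_song_verses (song_data : List (String × List (List (String × String)))) (max_verses : Int) (out : List (String × List (List (String × String)))) : Prop := out = slice_song_verses_alt song_data max_verses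
instance (song_data : List (String × List (List (String × String)))) (max_verses : Int) (out : List (String × List (List (String × String)))) : Decidable (Spec_slice_song_verses song_data max_verses out) := by unfold Spec_slice_song_verses; infer_instance

-- ===== CLAIM (what is proved, stated in full; the proofs are below) =====
def Claim_equal_slice_song_verses : Prop := ∀ (song_data : List (String × List (List (String × String)))) (max_verses : Int), Dom_slice_song_verses song_data max_verses → Spec_slice_song_verses song_data max_verses (slice_song_verses song_data max_verses)

-- ===== LEMMAS AND PROOFS =====

-- reference result: keep every non-verse section and the first b verse sections
def pvRefK : List (List (String × String)) → Nat → List (List (String × String))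
  | [], _ => []
  | s :: t, b =>
    if pvIsVerse s then
      match b with
      | 0 => pvRefK t 0
      | b' + 1 => s :: pvRefK t b'
    else s :: pvRefK t b

-- A's loop computes pvRefK with budget (max_verses - verse_count).toNat
theorem pvA_loop (mv : Int) : ∀ (l : List (List (String × String)))
    (acc : List (List (String × String))) (vc : Int),
    (l.foldl (pvStepA mv) (acc, vc)).1 = acc ++ pvRefK l (mv - vc).toNat := by
  intro l
  induction l with
  | nil => intro acc vc; simp [pvRefK]
  | cons s t ih =>
    intro acc vc
    rw [List.foldl_cons]
    by_cases hv : pvIsVerse s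
    · by_cases hgt : vc + 1 > mv
      · have hstep : pvStepA mv (acc, vc) s = (acc, vc + 1) := by
          simp [pvStepA, hv, hgt]
        have h0 : (mv - vc).toNat = 0 := by omega
        have h1 : (mv - (vc + 1)).toNat = 0 := by omega
        rw [hstep, ih, h1, h0]
        simp [pvRefK, hv]
      · have hstep : pvStepA mv (acc, vc) s = (acc ++ [s], vc + 1) := by
          simp [pvStepA, hv, hgt]
        have h0 : (mv - vc).toNat = (mv - (vc + 1)).toNat + 1 := by omega
        rw [hstep, ih, h0]
        simp [pvRefK, hv]
    · have hstep : pvStepA mv (acc, vc) s = (acc ++ [s], vc) := by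
        simp [pvStepA, hv]
      rw [hstep, ih]
      simp [pvRefK, hv]

-- B's filter over an arbitrarily shifted enumeration computes pvRefK, provided the
-- membership test S agrees with "among the first b verse positions of the suffix"
theorem pvB_loop : ∀ (l : List (List (String × String))) (i0 : Int) (S : Int → Bool) (b : Nat),
    (∀ i : Int, i0 ≤ i →
      (S i = true ↔ i ∈ (((PySem.List.enumerate l i0).filter (fun p => pvIsVerse p.2)).map (·.1)).take b)) →
    ((PySem.List.enumerate l i0).filter (fun p => !pvIsVerse p.2 || S p.1)).map (·.2)
      = pvRefK l b := by
  intro l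
  induction l with
  | nil => intro i0 S b _; simp [PySem.List.enumerate_nil, pvRefK]
  | cons s t ih =>
    intro i0 S b H
    rw [PySem.List.enumerate_cons]
    by_cases hv : pvIsVerse s
    · cases b with
      | zero =>
        have hS : S i0 = false := by
          have := H i0 le_rfl
          simp at this; simp [this]
        simp only [List.filter_cons, hv, hS]
        simp only [pvRefK, hv, if_true]
        refine ih (i0 + 1) S 0 ?_
        intro i hi
        have := H i (by omega)
        simpa using this
      | succ b' =>
        have hvidx : ((PySem.List.enumerate (s :: t) i0).filter (fun p => pvIsVerse p.2)).map (·.1)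
            = i0 :: ((PySem.List.enumerate t (i0 + 1)).filter (fun p => pvIsVerse p.2)).map (·.1) := by
          rw [PySem.List.enumerate_cons]; simp [hv]
        have hS : S i0 = true := by
          rw [H i0 le_rfl, hvidx]; simp [List.take_succ_cons]
        simp only [List.filter_cons, hv, hS, Bool.not_true, Bool.false_or, List.map_cons]
        simp only [pvRefK, hv, if_true]
        refine congrArg (s :: ·) (ih (i0 + 1) S b' ?_)
        intro i hi
        rw [H i (by omega), hvidx, List.take_succ_cons]
        have hne : i ≠ i0 := by omega
        simp [List.mem_cons, hne]
    · simp only [List.filter_cons, hv, Bool.not_false, Bool.true_or, if_true, List.map_cons]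
      simp only [pvRefK, hv]
      refine congrArg (s :: ·) (ih (i0 + 1) S b ?_)
      intro i hi
      have := H i (by omega)
      rw [this, PySem.List.enumerate_cons]
      simp [hv]

-- ===== VERDICT (by name: the statement is the Claim_ definition above) =====
theorem slice_song_verses_spec : Claim_equal_slice_song_verses := by
  intro song_data max_verses _
  unfold Spec_slice_song_verses slice_song_verses slice_song_verses_alt
  simp only []
  set d : PySem.Dict String (List (List (String × String))) := PySem.Dict.mk song_data with hd
  set sections := d.getD "sections" [] with hs
  by_cases he : sections.isEmpty
  · simp [he]
  · simp only [he]
    congr 2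
    -- trimmed lists agree
    have hk : PySem.List.slice
        (((PySem.List.enumerate sections 0).filter (fun p => pvIsVerse p.2)).map (·.1)) none
        (some (max max_verses 0))
        = (((PySem.List.enumerate sections 0).filter (fun p => pvIsVerse p.2)).map (·.1)).take
           (max max_verses 0).toNat :=
      PySem.List.slice_to _ (by omega)
    rw [pvA_loop max_verses sections [] 0, List.nil_append,
      show (max_verses - 0).toNat = (max max_verses 0).toNat by omega]
    have hb := pvB_loop sections 0
      (fun i => (PySem.Set.ofList (PySem.List.slice
        (((PySem.List.enumerate sections 0).filter (fun p => pvIsVerse p.2)).map (·.1)) none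
        (some (max max_verses 0)))).contains i)
      (max max_verses 0).toNat ?_
    · rw [← hb]
    · intro i _
      rw [hk]
      simp [PySem.Set.mem_ofList]
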